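-- pv_equiv track=rewrite | github.com/nmarizani/capstone_project | src/fusion_model_files/utils.py | split_feature_groups
-- ===== SOURCE A (Python) =====
-- from typing import Iterable, List, Optional, Tuple
--
-- def split_feature_groups(columns: List[str]) -> dict:
--     return {
--         "clinical_embeddings": [c for c in columns if c.startswith("clin_emb_")],
--         "anemia_embeddings": [c for c in columns if c.startswith("anemia_emb_")],
--         "ppg_embeddings": [c for c in columns if c.startswith("ppg_emb_")],
--         "fusion_embeddings": [c for c in columns if c.startswith("fusion_emb_")],
--         "anemia_prob": [c for c in columns if c == "p_anemia"],
--         "ppg_proxies": [c for c in columns if c in {"hr_bpm_est", "ibi_mean", "ibi_std", "peak_count", "ppg_amp_mean", "ppg_amp_std", "signal_quality"}],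
--     }
-- ===== SOURCE B (Python) =====
-- _PPG_PROXIES = {"hr_bpm_est", "ibi_mean", "ibi_std", "peak_count",
--                 "ppg_amp_mean", "ppg_amp_std", "signal_quality"}
--
--
-- def split_feature_groups(columns):
--     groups = {
--         "clinical_embeddings": [],
--         "anemia_embeddings": [],
--         "ppg_embeddings": [],
--         "fusion_embeddings": [],
--         "anemia_prob": [],
--         "ppg_proxies": [],
--     }
--     for c in columns:
--         if c.startswith("clin_emb_"):
--             groups["clinical_embeddings"].append(c)
--         elif c.startswith("anemia_emb_"):
--             groups["anemia_embeddings"].append(c)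
--         elif c.startswith("ppg_emb_"):
--             groups["ppg_embeddings"].append(c)
--         elif c.startswith("fusion_emb_"):
--             groups["fusion_embeddings"].append(c)
--         elif c == "p_anemia":
--             groups["anemia_prob"].append(c)
--         elif c in _PPG_PROXIES:
--             groups["ppg_proxies"].append(c)
--     return groups
-- ===== Notes on version B (the rewrite author's own statement) =====
-- stated objective: alternative
-- what changed: Replaces six independent list comprehensions (six passes over columns) by a single pass that dispatches each column to its unique bucket via an if/elif chain over pre-initialized empty buckets.
import Mathlib
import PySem

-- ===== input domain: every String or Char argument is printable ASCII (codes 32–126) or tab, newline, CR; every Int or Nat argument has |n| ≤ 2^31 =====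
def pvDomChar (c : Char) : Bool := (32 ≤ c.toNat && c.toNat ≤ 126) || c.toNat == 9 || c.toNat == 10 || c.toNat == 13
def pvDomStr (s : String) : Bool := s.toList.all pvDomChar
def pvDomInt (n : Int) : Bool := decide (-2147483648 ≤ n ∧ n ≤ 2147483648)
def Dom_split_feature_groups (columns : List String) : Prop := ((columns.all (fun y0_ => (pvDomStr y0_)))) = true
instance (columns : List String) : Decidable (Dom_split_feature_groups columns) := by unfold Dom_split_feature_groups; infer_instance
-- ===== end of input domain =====

-- B makes one pass with an if/elif dispatch instead of A's six comprehensions; same return value, no speed claim.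

-- ===== PORT A =====
-- the Python set literal in A's last comprehension, as its list of distinct elements
def pvProxies : List String :=
  ["hr_bpm_est", "ibi_mean", "ibi_std", "peak_count", "ppg_amp_mean", "ppg_amp_std", "signal_quality"]

def split_feature_groups (columns : List String) : List (String × List String) :=
  [("clinical_embeddings", columns.filter (fun c => PySem.Str.startswith c "clin_emb_")),
   ("anemia_embeddings",   columns.filter (fun c => PySem.Str.startswith c "anemia_emb_")),
   ("ppg_embeddings",      columns.filter (fun c => PySem.Str.startswith c "ppg_emb_")),
   ("fusion_embeddings",   columns.filter (fun c => PySem.Str.startswith c "fusion_emb_")),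
   ("anemia_prob",         columns.filter (fun c => c == "p_anemia")),
   ("ppg_proxies",         columns.filter (fun c => pvProxies.contains c))]

-- ===== PORT B =====
-- the dict of six fixed keys is carried as a six-tuple of bucket lists, in key order
def pvStepB (st : List String × List String × List String × List String × List String × List String)
    (c : String) : List String × List String × List String × List String × List String × List String :=
  let (g1, g2, g3, g4, g5, g6) := st
  if PySem.Str.startswith c "clin_emb_" then (g1 ++ [c], g2, g3, g4, g5, g6)
  else if PySem.Str.startswith c "anemia_emb_" then (g1, g2 ++ [c], g3, g4, g5, g6)
  else if PySem.Str.startswith c "ppg_emb_" then (g1, g2, g3 ++ [c], g4, g5, g6)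
  else if PySem.Str.startswith c "fusion_emb_" then (g1, g2, g3, g4 ++ [c], g5, g6)
  else if c == "p_anemia" then (g1, g2, g3, g4, g5 ++ [c], g6)
  else if pvProxies.contains c then (g1, g2, g3, g4, g5, g6 ++ [c])
  else (g1, g2, g3, g4, g5, g6)

def split_feature_groups_alt (columns : List String) : List (String × List String) :=
  let g := columns.foldl pvStepB ([], [], [], [], [], [])
  [("clinical_embeddings", g.1), ("anemia_embeddings", g.2.1), ("ppg_embeddings", g.2.2.1),
   ("fusion_embeddings", g.2.2.2.1), ("anemia_prob", g.2.2.2.2.1), ("ppg_proxies", g.2.2.2.2.2)]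

-- ===== PRECONDITION & SPEC =====
def Spec_split_feature_groups (columns : List String) (out : List (String × List String)) : Prop := out = split_feature_groups_alt columns
instance (columns : List String) (out : List (String × List String)) : Decidable (Spec_split_feature_groups columns out) := by unfold Spec_split_feature_groups; infer_instance

-- ===== CLAIM (what is proved, stated in full; the proofs are below) =====
def Claim_equal_split_feature_groups : Prop := ∀ (columns : List String), Dom_split_feature_groups columns → Spec_split_feature_groups columns (split_feature_groups columns)

-- ===== LEMMAS AND PROOFS =====

-- a string that starts with prefix p starts with p's first character
theorem pv_sw_head {c p : String} {a : Char} (hp : p.toList.head? = some a)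
    (h : PySem.Str.startswith c p = true) : c.toList.head? = some a := by
  rw [PySem.Str.startswith_eq] at h
  obtain ⟨t, ht⟩ := (PySem.Chars.startswith_iff _ _).mp h
  cases hpl : p.toList with
  | nil => simp [hpl] at hp
  | cons x xs =>
    rw [hpl] at ht hp
    rw [← ht]
    simpa using hp

theorem pv_mem_proxies {c : String} (h : pvProxies.contains c = true) :
    c = "hr_bpm_est" ∨ c = "ibi_mean" ∨ c = "ibi_std" ∨ c = "peak_count" ∨
    c = "ppg_amp_mean" ∨ c = "ppg_amp_std" ∨ c = "signal_quality" := by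
  simpa [pvProxies] using h

-- a column matching one of the six conditions matches no other: B's if/elif chain
-- puts each column in exactly the buckets A's six independent filters do
theorem pv_step_eq (c : String)
    (g1 g2 g3 g4 g5 g6 : List String) :
    pvStepB (g1, g2, g3, g4, g5, g6) c =
      (g1 ++ (if PySem.Str.startswith c "clin_emb_" then [c] else []),
       g2 ++ (if PySem.Str.startswith c "anemia_emb_" then [c] else []),
       g3 ++ (if PySem.Str.startswith c "ppg_emb_" then [c] else []),
       g4 ++ (if PySem.Str.startswith c "fusion_emb_" then [c] else []),
       g5 ++ (if c == "p_anemia" then [c] else []),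
       g6 ++ (if pvProxies.contains c then [c] else [])) := by
  unfold pvStepB
  by_cases h1 : PySem.Str.startswith c "clin_emb_" = true
  · have hc : c.toList.head? = some 'c' := pv_sw_head (a := 'c') (by decide) h1
    have e2 : PySem.Str.startswith c "anemia_emb_" = false := by
      cases he : PySem.Str.startswith c "anemia_emb_" with
      | false => rfl
      | true => have := pv_sw_head (a := 'a') (by decide) he; simp [hc] at this
    have e3 : PySem.Str.startswith c "ppg_emb_" = false := by
      cases he : PySem.Str.startswith c "ppg_emb_" with
      | false => rfl
      | true => have := pv_sw_head (a := 'p') (by decide) he; simp [hc] at this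
    have e4 : PySem.Str.startswith c "fusion_emb_" = false := by
      cases he : PySem.Str.startswith c "fusion_emb_" with
      | false => rfl
      | true => have := pv_sw_head (a := 'f') (by decide) he; simp [hc] at this
    have e5 : (c == "p_anemia") = false := by
      cases he : (c == "p_anemia") with
      | false => rfl
      | true =>
        have : c = "p_anemia" := by simpa using he
        subst this; exact absurd h1 (by decide)
    have e6 : pvProxies.contains c = false := by
      cases he : pvProxies.contains c with
      | false => rfl
      | true =>
        exfalso
        rcases pv_mem_proxies he with rfl | rfl | rfl | rfl | rfl | rfl | rfl <;>
          exact absurd h1 (by decide)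
    simp_all
  · rw [Bool.not_eq_true] at h1
    by_cases h2 : PySem.Str.startswith c "anemia_emb_" = true
    · have hc : c.toList.head? = some 'a' := pv_sw_head (a := 'a') (by decide) h2
      have e3 : PySem.Str.startswith c "ppg_emb_" = false := by
        cases he : PySem.Str.startswith c "ppg_emb_" with
        | false => rfl
        | true => have := pv_sw_head (a := 'p') (by decide) he; simp [hc] at this
      have e4 : PySem.Str.startswith c "fusion_emb_" = false := by
        cases he : PySem.Str.startswith c "fusion_emb_" with
        | false => rfl
        | true => have := pv_sw_head (a := 'f') (by decide) he; simp [hc] at this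
      have e5 : (c == "p_anemia") = false := by
        cases he : (c == "p_anemia") with
        | false => rfl
        | true =>
          have : c = "p_anemia" := by simpa using he
          subst this; exact absurd h2 (by decide)
      have e6 : pvProxies.contains c = false := by
        cases he : pvProxies.contains c with
        | false => rfl
        | true =>
          exfalso
          rcases pv_mem_proxies he with rfl | rfl | rfl | rfl | rfl | rfl | rfl <;>
            exact absurd h2 (by decide)
      simp_all
    · rw [Bool.not_eq_true] at h2
      by_cases h3 : PySem.Str.startswith c "ppg_emb_" = true
      · have e4 : PySem.Str.startswith c "fusion_emb_" = false := by
          have hc : c.toList.head? = some 'p' := pv_sw_head (a := 'p') (by decide) h3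
          cases he : PySem.Str.startswith c "fusion_emb_" with
          | false => rfl
          | true => have := pv_sw_head (a := 'f') (by decide) he; simp [hc] at this
        have e5 : (c == "p_anemia") = false := by
          cases he : (c == "p_anemia") with
          | false => rfl
          | true =>
            have : c = "p_anemia" := by simpa using he
            subst this; exact absurd h3 (by decide)
        have e6 : pvProxies.contains c = false := by
          cases he : pvProxies.contains c with
          | false => rfl
          | true =>
            exfalso
            rcases pv_mem_proxies he with rfl | rfl | rfl | rfl | rfl | rfl | rfl <;>
              exact absurd h3 (by decide)
        simp_all
      · rw [Bool.not_eq_true] at h3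
        by_cases h4 : PySem.Str.startswith c "fusion_emb_" = true
        · have e5 : (c == "p_anemia") = false := by
            cases he : (c == "p_anemia") with
            | false => rfl
            | true =>
              have : c = "p_anemia" := by simpa using he
              subst this; exact absurd h4 (by decide)
          have e6 : pvProxies.contains c = false := by
            cases he : pvProxies.contains c with
            | false => rfl
            | true =>
              exfalso
              rcases pv_mem_proxies he with rfl | rfl | rfl | rfl | rfl | rfl | rfl <;>
                exact absurd h4 (by decide)
          simp_all
        · rw [Bool.not_eq_true] at h4
          by_cases h5 : (c == "p_anemia") = true
          · have e6 : pvProxies.contains c = false := by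
              have : c = "p_anemia" := by simpa using h5
              subst this; decide
            simp_all
          · rw [Bool.not_eq_true] at h5
            by_cases h6 : pvProxies.contains c = true
            · simp_all
            · rw [Bool.not_eq_true] at h6
              simp_all

-- invariant of B's single pass: the six buckets accumulate exactly A's six filters
theorem pv_foldl_eq (cs : List String) (g1 g2 g3 g4 g5 g6 : List String) :
    cs.foldl pvStepB (g1, g2, g3, g4, g5, g6) =
      (g1 ++ cs.filter (fun c => PySem.Str.startswith c "clin_emb_"),
       g2 ++ cs.filter (fun c => PySem.Str.startswith c "anemia_emb_"),
       g3 ++ cs.filter (fun c => PySem.Str.startswith c "ppg_emb_"),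
       g4 ++ cs.filter (fun c => PySem.Str.startswith c "fusion_emb_"),
       g5 ++ cs.filter (fun c => c == "p_anemia"),
       g6 ++ cs.filter (fun c => pvProxies.contains c)) := by
  induction cs generalizing g1 g2 g3 g4 g5 g6 with
  | nil => simp
  | cons c cs ih =>
    rw [List.foldl_cons, pv_step_eq, ih]
    simp only [List.filter_cons]
    split_ifs <;> simp

-- ===== VERDICT (by name: the statement is the Claim_ definition above) =====
theorem split_feature_groups_spec : Claim_equal_split_feature_groups := by
  intro columns _
  unfold Spec_split_feature_groups split_feature_groups split_feature_groups_alt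
  rw [pv_foldl_eq]
  simp
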